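-- pv_equiv track=rewrite | github.com/aaaronhsu/MKS22QA | 3_13extra2.py | challenge
-- ===== SOURCE A (Python) =====
-- def challenge(l, n):
--     ans = []
--     holder = []
--     for a in range(n):
--         for i in range(a, len(l), n):
--             holder += [l[i]]
--         ans += [holder]
--         holder = []
--     return ans
-- ===== SOURCE B (Python) =====
-- def challenge(l, n):
--     if n <= 0:
--         return []
--     ans = [[] for _ in range(n)]
--     for idx, x in enumerate(l):
--         ans[idx % n].append(x)
--     return ans
-- ===== Notes on version B (the rewrite author's own statement) =====
-- stated objective: idiomatic
-- what changed: Replaces A's nested per-group strided gather (range(a, len(l), n) inner loops) with a single forward scatter pass appending each element to bucket idx % n.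
import Mathlib
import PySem

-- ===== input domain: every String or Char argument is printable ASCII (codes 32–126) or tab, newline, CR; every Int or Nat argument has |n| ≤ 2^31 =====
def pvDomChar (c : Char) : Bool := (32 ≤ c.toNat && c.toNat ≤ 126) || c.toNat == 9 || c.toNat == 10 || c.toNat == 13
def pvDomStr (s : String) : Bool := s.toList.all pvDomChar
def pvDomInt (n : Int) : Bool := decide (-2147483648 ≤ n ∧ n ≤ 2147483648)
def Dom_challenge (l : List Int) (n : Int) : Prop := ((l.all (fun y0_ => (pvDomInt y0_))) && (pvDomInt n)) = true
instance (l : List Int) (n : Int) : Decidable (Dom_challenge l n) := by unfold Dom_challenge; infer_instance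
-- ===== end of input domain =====

-- B replaces A's nested per-group strided gather with a single forward scatter pass into idx-mod-n buckets (same asymptotics, more idiomatic).


-- ===== PORT A =====
-- 'l[i]' is ported as pyGetD: the inner loop's index i ∈ range(a, len(l), n) is always in range, so this is exact.
def challenge (l : List Int) (n : Int) : List (List Int) :=
  (PySem.List.pyRange 0 n 1).foldl
    (fun ans a =>
      ans ++ [(PySem.List.pyRange a (l.length : Int) n).foldl
          (fun holder i => holder ++ [PySem.List.pyGetD l i 0]) []]) []

-- ===== PORT B =====
def challenge_alt (l : List Int) (n : Int) : List (List Int) :=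
  if n ≤ 0 then []
  else
    (PySem.List.enumerate l).foldl
      (fun ans p => ans.modify (PySem.Int.mod p.1 n).toNat (fun g => g ++ [p.2]))
      (List.replicate n.toNat [])

-- ===== PRECONDITION & SPEC =====
def Spec_challenge (l : List Int) (n : Int) (out : List (List Int)) : Prop := out = challenge_alt l n
instance (l : List Int) (n : Int) (out : List (List Int)) : Decidable (Spec_challenge l n out) := by unfold Spec_challenge; infer_instance

-- ===== CLAIM (what is proved, stated in full; the proofs are below) =====
def Claim_equal_challenge : Prop := ∀ (l : List Int) (n : Int), Dom_challenge l n → Spec_challenge l n (challenge l n)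

-- ===== LEMMAS AND PROOFS =====

-- the elements of l whose index is ≡ j (mod m), in index order: the common characterisation of both programs' group j
def sel0 (l : List Int) (m j : Nat) : List Int :=
  ((List.range l.length).filter (fun i => i % m == j)).map (fun i => l.getD i 0)

theorem mem_filter_range_cast (m a L : Nat) (x : Int) (hm : 0 < m) (ha : a < m) :
    x ∈ ((List.range L).filter (fun i => i % m == a)).map Int.ofNat
      ↔ ((a:Int) ≤ x ∧ x < (L:Int) ∧ (m:Int) ∣ x - (a:Int)) := by
  simp only [List.mem_map, List.mem_filter, List.mem_range, beq_iff_eq, Int.ofNat_eq_natCast]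
  constructor
  · rintro ⟨i, ⟨hiL, hmod⟩, rfl⟩
    have h1 : i = m * (i / m) + a := by conv_lhs => rw [← Nat.div_add_mod i m]; rw [hmod]
    have h2 : ((m * (i / m) + a : Nat) : Int) = (m:Int) * ((i / m : Nat) : Int) + (a:Int) := by
      push_cast; ring
    have h3 := Nat.mod_le i m
    refine ⟨by omega, by exact_mod_cast hiL, ⟨((i / m : Nat) : Int), ?_⟩⟩
    omega
  · rintro ⟨h1, h2, t, ht⟩
    have ht0 : 0 ≤ t := by by_contra h; push_neg at h; nlinarith [Int.natCast_pos.mpr hm]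
    have h3 : ((m * t.toNat : Nat) : Int) = (m:Int) * t := by push_cast [Int.toNat_of_nonneg ht0]; ring
    refine ⟨x.toNat, ⟨by omega, ?_⟩, by omega⟩
    have hx : x.toNat = a + m * t.toNat := by omega
    rw [hx, Nat.add_mul_mod_self_left, Nat.mod_eq_of_lt ha]

theorem pairwise_lt_eq_of_perm {l₁ l₂ : List Int} (h : l₁.Perm l₂)
    (s₁ : l₁.Pairwise (· < ·)) (s₂ : l₂.Pairwise (· < ·)) : l₁ = l₂ :=
  List.Perm.eq_of_pairwise (fun _ _ _ _ hab hba => le_antisymm hab hba)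
    (s₁.imp le_of_lt) (s₂.imp le_of_lt) h

-- A's strided index list range(a, L, m) is exactly the indices < L that are ≡ a (mod m)
theorem pyRange_step_eq_filter (m a L : Nat) (hm : 0 < m) (ha : a < m) :
    PySem.List.pyRange (a : Int) (L : Int) (m : Int)
      = ((List.range L).filter (fun i => i % m == a)).map Int.ofNat := by
  have hm' : (0:Int) < (m:Int) := by exact_mod_cast hm
  have pw1 : (PySem.List.pyRange (a : Int) (L : Int) (m : Int)).Pairwise (· < ·) := by
    rw [PySem.List.pyRange_of_pos _ _ hm']
    exact List.pairwise_map.mpr (List.pairwise_lt_range.imp (fun h => by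
      nlinarith [Int.ofNat_lt.mpr h]))
  have pw2 : (((List.range L).filter (fun i => i % m == a)).map Int.ofNat).Pairwise (· < ·) :=
    List.pairwise_map.mpr ((List.pairwise_lt_range.filter _).imp
      (fun h => Int.ofNat_lt.mpr h))
  refine pairwise_lt_eq_of_perm ?_ pw1 pw2
  rw [List.perm_ext_iff_of_nodup (pw1.imp ne_of_lt) (pw2.imp ne_of_lt)]
  intro x
  rw [mem_filter_range_cast m a L x hm ha, PySem.List.mem_pyRange_iff_of_pos hm']

-- A's inner gather for group a is sel0
theorem selA (l : List Int) (m a : Nat) (hm : 0 < m) (ha : a < m) :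
    (PySem.List.pyRange (a : Int) (l.length : Int) (m : Int)).map
        (fun i => PySem.List.pyGetD l i 0)
      = sel0 l m a := by
  rw [pyRange_step_eq_filter m a l.length hm ha, List.map_map, sel0]
  apply List.map_congr_left
  intro i hi
  simp only [Function.comp, Int.ofNat_eq_natCast]
  rw [PySem.List.pyGetD_of_nonneg l 0 (by positivity)]
  simp

theorem sel0_snoc (ys : List Int) (x : Int) (m j : Nat) :
    sel0 (ys ++ [x]) m j = sel0 ys m j ++ (if ys.length % m == j then [x] else []) := by
  unfold sel0
  simp only [List.length_append, List.length_singleton, List.range_succ, List.filter_append,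
    List.map_append]
  congr 1
  · apply List.map_congr_left
    intro i hi
    have : i < ys.length := List.mem_range.mp (List.mem_of_mem_filter hi)
    rw [List.getD_append _ _ _ _ this]
  · by_cases h : ys.length % m == j
    · simp [h]
    · simp [h]

-- B's scatter fold computes all the groups at once
theorem scatter (m : Nat) (hm : 0 < m) (l : List Int) :
    (PySem.List.enumerate l).foldl
        (fun ans p => ans.modify (PySem.Int.mod p.1 (m : Int)).toNat (fun g => g ++ [p.2]))
        (List.replicate m ([] : List Int))
      = (List.range m).map (fun j => sel0 l m j) := by
  have hm' : (0:Int) < (m:Int) := by exact_mod_cast hm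
  induction l using List.reverseRecOn with
  | nil =>
      simp [PySem.List.enumerate_nil, sel0, List.map_const']
  | append_singleton ys x ih =>
      rw [PySem.List.enumerate_append, List.foldl_append, ih]
      simp only [PySem.List.enumerate_cons, PySem.List.enumerate_nil, List.foldl_cons,
        List.foldl_nil, zero_add]
      rw [PySem.Int.mod_eq_emod_of_pos hm']
      have hmod : ((ys.length : Int) % (m : Int)).toNat = ys.length % m := by omega
      rw [hmod]
      apply List.ext_getElem
      · simp
      · intro j h1 h2
        simp only [List.getElem_modify, List.getElem_map, List.getElem_range]
        rw [sel0_snoc]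
        by_cases h : ys.length % m = j
        · simp [h]
        · simp [h, (by simpa using h : ¬ (ys.length % m == j) = true)]

theorem challenge_eq (l : List Int) (n : Int) : challenge l n = challenge_alt l n := by
  unfold challenge challenge_alt
  by_cases hn : n ≤ 0
  · rw [if_pos hn, PySem.List.pyRange_one_eq_nil hn]; rfl
  · rw [if_neg hn]
    obtain ⟨m, rfl⟩ : ∃ m : Nat, n = (m:Int) := ⟨n.toNat, by omega⟩
    have hm0 : 0 < m := by omega
    rw [Int.toNat_natCast, scatter m hm0 l]
    rw [PySem.List.foldl_append_eq_flatMap, ← List.map_eq_flatMap, List.nil_append]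
    rw [PySem.List.pyRange_zero_natCast, List.map_map]
    apply List.map_congr_left
    intro a ha
    have ham : a < m := List.mem_range.mp ha
    simp only [Function.comp]
    rw [PySem.List.foldl_append_eq_flatMap, ← List.map_eq_flatMap, List.nil_append]
    exact selA l m a hm0 ham

-- ===== VERDICT (by name: the statement is the Claim_ definition above) =====
theorem challenge_spec : Claim_equal_challenge := by
  intro l n _
  exact challenge_eq l n
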